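-- pv_equiv track=rewrite | github.com/WHS-DTECH/FOOORMINVENTORY | debug_parser/debug_parser_title.py | infer_title_above
-- ===== SOURCE A (Python) =====
-- def infer_title_above(lines, start_idx, ingredient_block):
--     # Look up to 5 lines above the first ingredient line
--     food_words = set()
--     for ing in ingredient_block:
--         tokens = ing.split()
--         if len(tokens) > 2:
--             food_words.add(tokens[-1].lower())
--             food_words.add(tokens[2].lower())
--     for j in range(1, 6):
--         idx = start_idx - j
--         if idx < 0:
--             break
--         candidate = lines[idx].strip()
--         if 2 < len(candidate) < 60:
--             if any(word in candidate.lower() for word in food_words):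
--                 return candidate
--     for j in range(1, 6):
--         idx = start_idx - j
--         if idx < 0:
--             break
--         candidate = lines[idx].strip()
--         if 2 < len(candidate) < 60:
--             return candidate
--     return 'Unknown Recipe'
-- ===== SOURCE B (Python) =====
-- def infer_title_above(lines, start_idx, ingredient_block):
--     food_words = set()
--     for ing in ingredient_block:
--         tokens = ing.split()
--         if len(tokens) > 2:
--             food_words.add(tokens[-1].lower())
--             food_words.add(tokens[2].lower())
--     first_valid = None
--     first_with_food = None
--     for j in range(1, 6):
--         idx = start_idx - j
--         if idx < 0:
--             break
--         candidate = lines[idx].strip()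
--         if 2 < len(candidate) < 60:
--             if first_valid is None:
--                 first_valid = candidate
--             if first_with_food is None and any(w in candidate.lower() for w in food_words):
--                 first_with_food = candidate
--     if first_with_food is not None:
--         return first_with_food
--     if first_valid is not None:
--         return first_valid
--     return 'Unknown Recipe'
-- ===== Notes on version B (the rewrite author's own statement) =====
-- stated objective: simpler
-- what changed: Replaces A's two separate backward scans (one for a food-word match, one for any valid line) by a single bounded scan that records two independent accumulators (first valid line, first valid line containing a food word) and picks between them afterwards.
import Mathlib
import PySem

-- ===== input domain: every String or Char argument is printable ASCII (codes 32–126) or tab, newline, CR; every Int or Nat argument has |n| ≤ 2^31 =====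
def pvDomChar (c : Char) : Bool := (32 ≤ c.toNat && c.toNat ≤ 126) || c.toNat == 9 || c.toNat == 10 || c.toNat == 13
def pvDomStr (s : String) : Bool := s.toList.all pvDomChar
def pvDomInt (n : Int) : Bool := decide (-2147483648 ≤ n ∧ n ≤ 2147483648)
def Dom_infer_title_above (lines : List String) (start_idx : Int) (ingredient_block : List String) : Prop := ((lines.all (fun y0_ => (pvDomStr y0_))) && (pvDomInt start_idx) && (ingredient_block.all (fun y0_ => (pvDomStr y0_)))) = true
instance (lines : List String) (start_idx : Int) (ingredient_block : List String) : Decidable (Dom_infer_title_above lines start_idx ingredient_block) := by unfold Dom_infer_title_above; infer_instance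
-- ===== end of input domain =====

-- B does one bounded backward scan with two independent accumulators instead of A's two
-- separate backward scans; same return value (objective: simpler, one pass instead of two).

-- ===== PORT A =====
-- food_words set, built exactly as the Python loop does (both Pythons share this code verbatim)
def pvFoodWords (ingredient_block : List String) : PySem.Set String :=
  ingredient_block.foldl (fun fw ing =>
    let tokens := PySem.Str.split₀ ing
    if tokens.length > 2 then
      PySem.Set.add (PySem.Set.add fw (PySem.Str.lower (PySem.List.pyGetD tokens (-1) "")))
        (PySem.Str.lower (PySem.List.pyGetD tokens 2 ""))
    else fw) PySem.Set.empty

-- any(word in candidate.lower() for word in food_words)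
def pvHasFood (fw : PySem.Set String) (candidate : String) : Bool :=
  fw.any (fun w => PySem.Str.isIn w (PySem.Str.lower candidate))

-- A's first loop: return the first valid candidate containing a food word
def pvLoopFood (lines : List String) (start_idx : Int) (fw : PySem.Set String) : List Int → Option String
  | [] => none
  | j :: rest =>
    let idx := start_idx - j
    if idx < 0 then none
    else
      let candidate := PySem.Str.strip (PySem.List.pyGetD lines idx "")
      if 2 < PySem.Str.len candidate ∧ PySem.Str.len candidate < 60 then
        if pvHasFood fw candidate then some candidate
        else pvLoopFood lines start_idx fw rest
      else pvLoopFood lines start_idx fw rest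

-- A's second loop: return the first valid candidate
def pvLoopAny (lines : List String) (start_idx : Int) : List Int → Option String
  | [] => none
  | j :: rest =>
    let idx := start_idx - j
    if idx < 0 then none
    else
      let candidate := PySem.Str.strip (PySem.List.pyGetD lines idx "")
      if 2 < PySem.Str.len candidate ∧ PySem.Str.len candidate < 60 then some candidate
      else pvLoopAny lines start_idx rest

def infer_title_above (lines : List String) (start_idx : Int) (ingredient_block : List String) : String :=
  let fw := pvFoodWords ingredient_block
  match pvLoopFood lines start_idx fw (PySem.List.pyRange 1 6 1) with
  | some c => c
  | none =>
    match pvLoopAny lines start_idx (PySem.List.pyRange 1 6 1) with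
    | some c => c
    | none => "Unknown Recipe"

-- ===== PORT B =====
-- B's single scan: state = (first_valid, first_with_food), each set at most once
def pvScan (lines : List String) (start_idx : Int) (fw : PySem.Set String) :
    List Int → Option String × Option String → Option String × Option String
  | [], acc => acc
  | j :: rest, (fv, ff) =>
    let idx := start_idx - j
    if idx < 0 then (fv, ff)
    else
      let candidate := PySem.Str.strip (PySem.List.pyGetD lines idx "")
      if 2 < PySem.Str.len candidate ∧ PySem.Str.len candidate < 60 then
        let fv' := if fv.isNone then some candidate else fv
        let ff' := if ff.isNone && pvHasFood fw candidate then some candidate else ff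
        pvScan lines start_idx fw rest (fv', ff')
      else pvScan lines start_idx fw rest (fv, ff)

def infer_title_above_alt (lines : List String) (start_idx : Int) (ingredient_block : List String) : String :=
  let fw := pvFoodWords ingredient_block
  match pvScan lines start_idx fw (PySem.List.pyRange 1 6 1) (none, none) with
  | (fv, ff) =>
    match ff with
    | some c => c
    | none =>
      match fv with
      | some c => c
      | none => "Unknown Recipe"

-- ===== PRECONDITION & SPEC =====
-- Pre_ excludes exactly the inputs on which the Python A raises IndexError
-- (start_idx exceeding len(lines), so lines[start_idx-1] is out of range); B raises there too.
def Pre_infer_title_above (lines : List String) (start_idx : Int) (ingredient_block : List String) : Prop :=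
  start_idx ≤ (lines.length : Int)
instance (lines : List String) (start_idx : Int) (ingredient_block : List String) : Decidable (Pre_infer_title_above lines start_idx ingredient_block) := by unfold Pre_infer_title_above; infer_instance

def pvWitness_infer_title_above : List String × Int × List String :=
  (["Tasty Pasta", "- 2 cups of pasta"], 1, ["- 2 cups of pasta"])

def Spec_infer_title_above (lines : List String) (start_idx : Int) (ingredient_block : List String) (out : String) : Prop := out = infer_title_above_alt lines start_idx ingredient_block
instance (lines : List String) (start_idx : Int) (ingredient_block : List String) (out : String) : Decidable (Spec_infer_title_above lines start_idx ingredient_block out) := by unfold Spec_infer_title_above; infer_instance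

-- ===== CLAIM (what is proved, stated in full; the proofs are below) =====
def Claim_equal_infer_title_above : Prop := ∀ (lines : List String) (start_idx : Int) (ingredient_block : List String), Dom_infer_title_above lines start_idx ingredient_block → Pre_infer_title_above lines start_idx ingredient_block → Spec_infer_title_above lines start_idx ingredient_block (infer_title_above lines start_idx ingredient_block)

-- ===== LEMMAS AND PROOFS =====

-- The one-pass scan computes exactly the pair of A's two loop results (accumulators win if set).
theorem pvScan_spec (lines : List String) (start_idx : Int) (fw : PySem.Set String) :
    ∀ (js : List Int) (fv ff : Option String),
      pvScan lines start_idx fw js (fv, ff) =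
        ((match fv with | some x => some x | none => pvLoopAny lines start_idx js),
         (match ff with | some x => some x | none => pvLoopFood lines start_idx fw js))
  | [], fv, ff => by cases fv <;> cases ff <;> simp [pvScan, pvLoopAny, pvLoopFood]
  | j :: rest, fv, ff => by
    simp only [pvScan, pvLoopAny, pvLoopFood]
    by_cases hneg : start_idx - j < 0
    · simp only [if_pos hneg]; cases fv <;> cases ff <;> rfl
    · simp only [if_neg hneg]
      set c := PySem.Str.strip (PySem.List.pyGetD lines (start_idx - j) "") with hc
      by_cases hv : 2 < PySem.Str.len c ∧ PySem.Str.len c < 60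
      · simp only [if_pos hv]
        rw [pvScan_spec lines start_idx fw rest]
        cases fv <;> cases ff <;> by_cases hf : pvHasFood fw c = true <;>
          simp [hf]
      · simp only [if_neg hv]
        rw [pvScan_spec lines start_idx fw rest]

-- ===== VERDICT (by name: the statement is the Claim_ definition above) =====
theorem infer_title_above_spec : Claim_equal_infer_title_above := by
  intro lines start_idx ingredient_block _ _
  simp only [Spec_infer_title_above, infer_title_above, infer_title_above_alt, pvScan_spec]
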